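-- pv_equiv track=rewrite | github.com/Sayeem2004/AdventOfCode | 2015/D5/2/2.py | solve
-- ===== SOURCE A (Python) =====
-- def solve(lines):
--     count = 0;
--     for line in lines:
--         double = False;
--         contains = False;
--         for i,x in enumerate(line):
--             if (i >= 2):
--                 if (x == line[i-2]): contains = True;
--                 if ((line[i-2]+line[i-1]) in line[i:]): double = True;
--         if (double and contains): count+=1;
--     return count;
-- ===== SOURCE B (Python) =====
-- def solve(lines):
--     count = 0
--     for line in lines:
--         n = len(line)
--         first = {}
--         double = False
--         sandwich = False
--         for i in range(n):
--             if i + 1 < n: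
--                 p = (line[i], line[i + 1])
--                 if p in first:
--                     if i - first[p] >= 2:
--                         double = True
--                 else:
--                     first[p] = i
--             if i >= 2 and line[i] == line[i - 2]:
--                 sandwich = True
--         if double and sandwich:
--             count += 1
--     return count
-- ===== Notes on version B (the rewrite author's own statement) =====
-- stated objective: alternative
-- what changed: A rescans the rest of the line with a substring search at every position; B instead makes a single left-to-right pass keeping a dict from each pair to its first position (non-overlapping repeat = index gap >= 2) with the sandwich test inlined; it trades A's builtin substring scans for one explicit pass with a hash map.
import Mathlib
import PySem

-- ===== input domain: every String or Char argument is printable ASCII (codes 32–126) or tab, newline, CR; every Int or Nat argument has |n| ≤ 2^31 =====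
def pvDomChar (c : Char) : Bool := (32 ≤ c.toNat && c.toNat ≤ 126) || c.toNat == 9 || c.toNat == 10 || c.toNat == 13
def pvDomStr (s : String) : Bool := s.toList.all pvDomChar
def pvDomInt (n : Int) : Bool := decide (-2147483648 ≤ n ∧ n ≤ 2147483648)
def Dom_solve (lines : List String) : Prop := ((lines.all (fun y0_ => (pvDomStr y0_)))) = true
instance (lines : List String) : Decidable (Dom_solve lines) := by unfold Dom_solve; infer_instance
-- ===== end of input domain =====

-- B replaces A's per-position substring search over the rest of the line by a single pass
-- keeping a dict of first pair positions (alternative algorithm); same count on every input.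

-- ===== PORT A =====
-- A's inner loop over one line: state (double, contains), A's enumerate loop step for step
def solveLineA (cs : List Char) : Bool × Bool :=
  (PySem.List.enumerate cs 0).foldl
    (fun st p =>
      if 2 ≤ p.1 then
        let contains := if p.2 = PySem.List.pyGetD cs (p.1 - 2) ' ' then true else st.2
        let double := if PySem.Chars.isIn
            [PySem.List.pyGetD cs (p.1 - 2) ' ', PySem.List.pyGetD cs (p.1 - 1) ' ']
            (PySem.List.slice cs (some p.1) none) = true then true else st.1
        (double, contains)
      else st)
    (false, false)

def solve (lines : List String) : Int :=
  lines.foldl (fun count line =>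
    let r := solveLineA line.toList
    if r.1 && r.2 then count + 1 else count) 0

-- ===== PORT B =====
-- B's inner loop over one line: state (first-pair-index dict, double, sandwich)
def solveLineB (cs : List Char) : PySem.Dict (Char × Char) Int × Bool × Bool :=
  (PySem.List.pyRange 0 cs.length).foldl
    (fun st i =>
      let st1 :=
        if i + 1 < (cs.length : Int) then
          let p := (PySem.List.pyGetD cs i ' ', PySem.List.pyGetD cs (i + 1) ' ')
          if st.1.contains p then
            (st.1, (if 2 ≤ i - st.1.getD p 0 then true else st.2.1), st.2.2)
          else
            (st.1.insert p i, st.2.1, st.2.2)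
        else st
      if 2 ≤ i ∧ PySem.List.pyGetD cs i ' ' = PySem.List.pyGetD cs (i - 2) ' ' then
        (st1.1, st1.2.1, true)
      else st1)
    (PySem.Dict.empty, false, false)

def solve_alt (lines : List String) : Int :=
  lines.foldl (fun count line =>
    let r := solveLineB line.toList
    if r.2.1 && r.2.2 then count + 1 else count) 0

-- ===== PRECONDITION & SPEC =====
def Spec_solve (lines : List String) (out : Int) : Prop := out = solve_alt lines
instance (lines : List String) (out : Int) : Decidable (Spec_solve lines out) := by unfold Spec_solve; infer_instance

-- ===== CLAIM (what is proved, stated in full; the proofs are below) =====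
def Claim_equal_solve : Prop := ∀ (lines : List String), Dom_solve lines → Spec_solve lines (solve lines)

-- ===== LEMMAS AND PROOFS =====

-- the pair of characters starting at position j (padded with ' ' past the end)
def pairAt (cs : List Char) (j : Nat) : Char × Char := (cs.getD j ' ', cs.getD (j + 1) ' ')

-- some pair repeats without overlap, right occurrence strictly below t
def dblB (cs : List Char) (t : Nat) : Bool :=
  decide (∃ k < t, k + 1 < cs.length ∧ ∃ j < k, j + 2 ≤ k ∧ pairAt cs j = pairAt cs k)
-- a sandwiched letter at a position strictly below t
def sndB (cs : List Char) (t : Nat) : Bool :=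
  decide (∃ i < t, 2 ≤ i ∧ i < cs.length ∧ cs.getD i ' ' = cs.getD (i - 2) ' ')


theorem foldl_or_pair {α : Type} (f g : α → Bool) (l : List α) (d c : Bool) :
    l.foldl (fun st x => (st.1 || f x, st.2 || g x)) (d, c) = (d || l.any f, c || l.any g) := by
  induction l generalizing d c with
  | nil => simp
  | cons a l ih => simp [List.foldl_cons, ih, Bool.or_assoc]

theorem pair_infix_iff (a b : Char) (t : List Char) :
    [a, b] <:+: t ↔ ∃ m, m + 1 < t.length ∧ t.getD m ' ' = a ∧ t.getD (m + 1) ' ' = b := by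
  constructor
  · rintro ⟨s, u, rfl⟩
    refine ⟨s.length, ?_, ?_, ?_⟩
    · simp
    · simp [List.getD_eq_getElem?_getD]
    · simp [List.getD_eq_getElem?_getD]
  · rintro ⟨m, hm, ha, hb⟩
    refine ⟨t.take m, t.drop (m + 2), ?_⟩
    have e1 : t.drop m = t[m] :: t.drop (m + 1) := List.drop_eq_getElem_cons (by omega)
    have e2 : t.drop (m + 1) = t[m + 1] :: t.drop (m + 2) := List.drop_eq_getElem_cons (by omega)
    have hga : t[m] = a := by rw [← List.getD_eq_getElem t ' ' (by omega)]; exact ha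
    have hgb : t[m + 1] = b := by rw [← List.getD_eq_getElem t ' ' (by omega)]; exact hb
    calc t.take m ++ [a, b] ++ t.drop (m + 2)
        = t.take m ++ t.drop m := by rw [e1, e2, hga, hgb]; simp
      _ = t := List.take_append_drop m t

theorem lineA_eq (cs : List Char) :
    solveLineA cs = (dblB cs cs.length, sndB cs cs.length) := by
  have hstep : (fun (st : Bool × Bool) (p : Int × Char) =>
      if 2 ≤ p.1 then
        let contains := if p.2 = PySem.List.pyGetD cs (p.1 - 2) ' ' then true else st.2
        let double := if PySem.Chars.isIn
            [PySem.List.pyGetD cs (p.1 - 2) ' ', PySem.List.pyGetD cs (p.1 - 1) ' ']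
            (PySem.List.slice cs (some p.1) none) = true then true else st.1
        (double, contains)
      else st)
    = (fun st p => (st.1 || (decide (2 ≤ p.1) && PySem.Chars.isIn
            [PySem.List.pyGetD cs (p.1 - 2) ' ', PySem.List.pyGetD cs (p.1 - 1) ' ']
            (PySem.List.slice cs (some p.1) none)),
        st.2 || (decide (2 ≤ p.1) && decide (p.2 = PySem.List.pyGetD cs (p.1 - 2) ' ')))) := by
    funext st p
    by_cases h : 2 ≤ p.1 <;> simp [h, Bool.or_comm]
  unfold solveLineA
  rw [hstep, foldl_or_pair]
  simp only [Bool.false_or, Prod.mk.injEq]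
  constructor
  · rw [Bool.eq_iff_iff, List.any_eq_true, dblB, decide_eq_true_iff]
    constructor
    · rintro ⟨x, hx, hfx⟩
      rw [PySem.List.mem_enumerate_iff] at hx
      obtain ⟨k, hk, rfl⟩ := hx
      simp only [zero_add] at hfx
      simp only [Bool.and_eq_true] at hfx
      obtain ⟨h2, hin⟩ := hfx
      have h2 : 2 ≤ k := by exact_mod_cast of_decide_eq_true h2
      have c2 : (k : Int) - 2 = ((k - 2 : Nat) : Int) := by omega
      have c1 : (k : Int) - 1 = ((k - 1 : Nat) : Int) := by omega
      rw [c2, c1, PySem.List.pyGetD_natCast, PySem.List.pyGetD_natCast,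
        show ((k : Nat) : Int) = ((k : Nat) : Int) from rfl] at hin
      rw [PySem.List.slice_from_natCast] at hin
      obtain ⟨m, hm, ha, hb⟩ := (pair_infix_iff _ _ _).mp ((PySem.Chars.isIn_iff_infix _ _).mp hin)
      rw [List.length_drop] at hm
      have hda : (cs.drop k).getD m ' ' = cs.getD (k + m) ' ' := by
        simp [List.getD_eq_getElem?_getD, List.getElem?_drop]
      have hdb : (cs.drop k).getD (m + 1) ' ' = cs.getD (k + m + 1) ' ' := by
        simp [List.getD_eq_getElem?_getD, List.getElem?_drop]
        rw [show k + (m + 1) = k + m + 1 by omega]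
      refine ⟨k + m, by omega, by omega, k - 2, by omega, by omega, ?_⟩
      unfold pairAt
      rw [show k - 2 + 1 = k - 1 by omega]
      rw [hda] at ha; rw [hdb] at hb
      rw [ha, hb]
    · rintro ⟨k, hkn, hk1, j, hjk, hj2, hpair⟩
      refine ⟨(Prod.mk ((j + 2 : Nat) : Int) (cs[(j + 2 : Nat)]'(by omega))), ?_, ?_⟩
      · rw [PySem.List.mem_enumerate_iff]
        exact ⟨j + 2, by omega, by simp⟩
      · simp only []
        have c2 : ((j + 2 : Nat) : Int) - 2 = ((j : Nat) : Int) := by omega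
        have c1 : ((j + 2 : Nat) : Int) - 1 = ((j + 1 : Nat) : Int) := by omega
        rw [Bool.and_eq_true, decide_eq_true_iff]
        refine ⟨by omega, ?_⟩
        rw [c2, c1, PySem.List.pyGetD_natCast, PySem.List.pyGetD_natCast,
          PySem.List.slice_from_natCast]
        rw [PySem.Chars.isIn_iff_infix, pair_infix_iff]
        refine ⟨k - (j + 2), ?_, ?_, ?_⟩
        · rw [List.length_drop]; omega
        · simp [List.getD_eq_getElem?_getD, List.getElem?_drop,
            show j + 2 + (k - (j + 2)) = k by omega]
          have := congrArg Prod.fst hpair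
          simpa [pairAt, List.getD_eq_getElem?_getD] using this.symm
        · simp [List.getD_eq_getElem?_getD, List.getElem?_drop,
            show j + 2 + (k - (j + 2) + 1) = k + 1 by omega]
          have := congrArg Prod.snd hpair
          simpa [pairAt, List.getD_eq_getElem?_getD] using this.symm
  · rw [Bool.eq_iff_iff, List.any_eq_true, sndB, decide_eq_true_iff]
    constructor
    · rintro ⟨x, hx, hgx⟩
      rw [PySem.List.mem_enumerate_iff] at hx
      obtain ⟨k, hk, rfl⟩ := hx
      simp only [zero_add] at hgx
      simp only [Bool.and_eq_true] at hgx
      obtain ⟨h2, heq⟩ := hgx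
      have h2 : 2 ≤ k := by exact_mod_cast of_decide_eq_true h2
      have c2 : (k : Int) - 2 = ((k - 2 : Nat) : Int) := by omega
      rw [c2, PySem.List.pyGetD_natCast] at heq
      refine ⟨k, by omega, h2, hk, ?_⟩
      rw [List.getD_eq_getElem cs ' ' hk]
      exact of_decide_eq_true heq
    · rintro ⟨i, hit, h2, hin, heq⟩
      refine ⟨(Prod.mk ((i : Nat) : Int) (cs[i]'hin)), ?_, ?_⟩
      · rw [PySem.List.mem_enumerate_iff]
        exact ⟨i, hin, by simp⟩
      · rw [Bool.and_eq_true, decide_eq_true_iff, decide_eq_true_iff]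
        refine ⟨by omega, ?_⟩
        have c2 : ((i : Nat) : Int) - 2 = ((i - 2 : Nat) : Int) := by omega
        rw [c2, PySem.List.pyGetD_natCast, ← List.getD_eq_getElem cs ' ' hin]
        exact heq


theorem pyRange_zero_natCast (n : Nat) :
    PySem.List.pyRange 0 (n : Int) = (List.range n).map (fun k => Int.ofNat k) := by
  rw [PySem.List.pyRange_of_pos 0 (n : Int) (by norm_num : (0:Int) < 1)]
  rcases Nat.eq_zero_or_pos n with h | h
  · subst h; simp
  · have h0 : (0 : Int) < (n : Int) := by exact_mod_cast h
    rw [if_pos h0]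
    have e : (((n : Int) - 0 + 1 - 1) / 1).toNat = n := by simp
    rw [e]
    simp [Int.ofNat_eq_natCast]

-- the step of B's inner loop, with the line fixed (same body as in solveLineB)
def bstep (cs : List Char) (st : PySem.Dict (Char × Char) Int × Bool × Bool) (i : Int) :
    PySem.Dict (Char × Char) Int × Bool × Bool :=
  let st1 :=
    if i + 1 < (cs.length : Int) then
      let p := (PySem.List.pyGetD cs i ' ', PySem.List.pyGetD cs (i + 1) ' ')
      if st.1.contains p then
        (st.1, (if 2 ≤ i - st.1.getD p 0 then true else st.2.1), st.2.2)
      else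
        (st.1.insert p i, st.2.1, st.2.2)
    else st
  if 2 ≤ i ∧ PySem.List.pyGetD cs i ' ' = PySem.List.pyGetD cs (i - 2) ' ' then
    (st1.1, st1.2.1, true)
  else st1

-- B's loop state after the first t iterations
def bpart (cs : List Char) (t : Nat) : PySem.Dict (Char × Char) Int × Bool × Bool :=
  ((List.range t).map (fun k => Int.ofNat k)).foldl (bstep cs) (PySem.Dict.empty, false, false)

theorem solveLineB_eq_bpart (cs : List Char) : solveLineB cs = bpart cs cs.length := by
  unfold solveLineB bpart bstep
  rw [pyRange_zero_natCast]

theorem bpart_succ (cs : List Char) (t : Nat) :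
    bpart cs (t + 1) = bstep cs (bpart cs t) (t : Int) := by
  unfold bpart
  rw [List.range_succ, List.map_append, List.foldl_append]
  simp



theorem bstep_eval (cs : List Char) (d : PySem.Dict (Char × Char) Int) (db sn : Bool) (t : Nat) :
    bstep cs (d, db, sn) (t : Int) =
      (let st1 :=
        if t + 1 < cs.length then
          (if d.contains (pairAt cs t) then
            (d, (if 2 ≤ (t : Int) - d.getD (pairAt cs t) 0 then true else db), sn)
          else (d.insert (pairAt cs t) (t : Int), db, sn))
        else (d, db, sn)
      if 2 ≤ t ∧ cs.getD t ' ' = cs.getD (t - 2) ' ' then (st1.1, st1.2.1, true) else st1) := by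
  have hp : (PySem.List.pyGetD cs (t : Int) ' ', PySem.List.pyGetD cs ((t : Int) + 1) ' ')
      = pairAt cs t := by
    unfold pairAt
    rw [show ((t : Int) + 1) = ((t + 1 : Nat) : Int) by push_cast; ring]
    rw [PySem.List.pyGetD_natCast, PySem.List.pyGetD_natCast]
  have hlt : ((t : Int) + 1 < (cs.length : Int)) ↔ t + 1 < cs.length := by
    constructor <;> intro h <;> omega
  have hsand : (2 ≤ (t : Int) ∧ PySem.List.pyGetD cs (t : Int) ' ' = PySem.List.pyGetD cs ((t : Int) - 2) ' ')
      ↔ (2 ≤ t ∧ cs.getD t ' ' = cs.getD (t - 2) ' ') := by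
    by_cases h2 : 2 ≤ t
    · have c : (t : Int) - 2 = ((t - 2 : Nat) : Int) := by omega
      rw [c, PySem.List.pyGetD_natCast, PySem.List.pyGetD_natCast]
      constructor <;> (rintro ⟨_, hb⟩; exact ⟨by omega, hb⟩)
    · constructor <;> (rintro ⟨ha, _⟩; exfalso; omega)
  simp only [bstep, hp, hlt, hsand]

-- the dict maps each pair value to the position of its first occurrence below t (and before the last char)
def dictInv (cs : List Char) (t : Nat) (d : PySem.Dict (Char × Char) Int) : Prop :=
  ∀ p : Char × Char,
    (d.get? p = none ∧ ∀ j, j < t → j + 1 < cs.length → pairAt cs j ≠ p) ∨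
    (∃ j0, j0 < t ∧ j0 + 1 < cs.length ∧ d.get? p = some ((j0 : Nat) : Int) ∧
      pairAt cs j0 = p ∧ ∀ j, j < j0 → pairAt cs j ≠ p)

theorem dblB_succ (cs : List Char) (t : Nat) :
    dblB cs (t + 1) =
      (dblB cs t || decide (t + 1 < cs.length ∧ ∃ j < t, j + 2 ≤ t ∧ pairAt cs j = pairAt cs t)) := by
  rw [Bool.eq_iff_iff]
  simp only [dblB, Bool.or_eq_true, decide_eq_true_eq]
  constructor
  · rintro ⟨k, hk, h1, j, hj, h2, hp⟩
    rcases Nat.lt_succ_iff_lt_or_eq.mp hk with hk' | rfl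
    · exact Or.inl ⟨k, hk', h1, j, hj, h2, hp⟩
    · exact Or.inr ⟨by omega, j, hj, h2, hp⟩
  · rintro (⟨k, hk, h1, j, hj, h2, hp⟩ | ⟨h1, j, hj, h2, hp⟩)
    · exact ⟨k, by omega, h1, j, hj, h2, hp⟩
    · exact ⟨t, by omega, by omega, j, hj, h2, hp⟩

theorem sndB_succ (cs : List Char) (t : Nat) :
    sndB cs (t + 1) =
      (sndB cs t || decide (2 ≤ t ∧ t < cs.length ∧ cs.getD t ' ' = cs.getD (t - 2) ' ')) := by
  rw [Bool.eq_iff_iff]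
  simp only [sndB, Bool.or_eq_true, decide_eq_true_eq]
  constructor
  · rintro ⟨i, hi, h2, hn, he⟩
    rcases Nat.lt_succ_iff_lt_or_eq.mp hi with hi' | rfl
    · exact Or.inl ⟨i, hi', h2, hn, he⟩
    · exact Or.inr ⟨h2, hn, he⟩
  · rintro (⟨i, hi, h2, hn, he⟩ | ⟨h2, hn, he⟩)
    · exact ⟨i, by omega, h2, hn, he⟩
    · exact ⟨t, by omega, h2, hn, he⟩

theorem B_invariant (cs : List Char) :
    ∀ t, t ≤ cs.length →
      dictInv cs t (bpart cs t).1 ∧ (bpart cs t).2 = (dblB cs t, sndB cs t) := by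
  intro t
  induction t with
  | zero =>
    intro _
    constructor
    · intro p
      exact Or.inl ⟨PySem.Dict.get?_empty _, by omega⟩
    · simp [bpart, dblB, sndB]
  | succ t ih =>
    intro ht
    obtain ⟨ihd, ihs⟩ := ih (by omega)
    obtain ⟨d, db, sn, hE⟩ : ∃ d db sn, bpart cs t = (d, db, sn) :=
      ⟨(bpart cs t).1, (bpart cs t).2.1, (bpart cs t).2.2, rfl⟩
    rw [hE] at ihd ihs
    have hdb : db = dblB cs t := by
      have := congrArg Prod.fst ihs; simpa using this
    have hsn : sn = sndB cs t := by
      have := congrArg Prod.snd ihs; simpa using this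
    have htn : t < cs.length := by omega
    rw [bpart_succ, hE, bstep_eval]
    -- the state after the pair-dict part of the step
    have key : ∃ d' db',
        (if t + 1 < cs.length then
          (if d.contains (pairAt cs t) then
            (d, (if 2 ≤ (t : Int) - d.getD (pairAt cs t) 0 then true else db), sn)
          else (d.insert (pairAt cs t) (t : Int), db, sn))
        else (d, db, sn)) = (d', db', sn)
        ∧ dictInv cs (t + 1) d' ∧ db' = dblB cs (t + 1) := by
      by_cases h1 : t + 1 < cs.length
      · rw [if_pos h1]
        rcases ihd (pairAt cs t) with ⟨hnone, hall⟩ | ⟨j0, hj0t, hj0n, hget, hpairj0, hmin⟩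
        · -- pair not seen yet: insert
          have hcon : d.contains (pairAt cs t) = false := by
            rw [PySem.Dict.contains_eq_isSome_get?, hnone]; rfl
          refine ⟨d.insert (pairAt cs t) ((t : Nat) : Int), db, ?_, ?_, ?_⟩
          · rw [hcon]; simp
          · intro q
            rw [PySem.Dict.get?_insert]
            by_cases hq : q = pairAt cs t
            · subst hq
              rw [if_pos rfl]
              refine Or.inr ⟨t, by omega, h1, rfl, rfl, ?_⟩
              intro j hj
              exact hall j (by omega) (by omega)
            · rw [if_neg hq]
              rcases ihd q with ⟨hn2, ha2⟩ | ⟨j0, hj0t, hj0n, hget, hpq, hm⟩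
              · refine Or.inl ⟨hn2, ?_⟩
                intro j hj hjn
                rcases Nat.lt_succ_iff_lt_or_eq.mp hj with hj' | rfl
                · exact ha2 j hj' hjn
                · exact fun hc => hq hc.symm
              · exact Or.inr ⟨j0, by omega, hj0n, hget, hpq, hm⟩
          · rw [hdb, dblB_succ]
            have : ¬(t + 1 < cs.length ∧ ∃ j < t, j + 2 ≤ t ∧ pairAt cs j = pairAt cs t) := by
              rintro ⟨_, j, hj, hj2, hpj⟩
              exact hall j hj (by omega) hpj
            simp [this]
        · -- pair already present at first position j0
          have hcon : d.contains (pairAt cs t) = true := by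
            rw [PySem.Dict.contains_eq_isSome_get?, hget]; rfl
          have hgd : d.getD (pairAt cs t) 0 = ((j0 : Nat) : Int) := by
            rw [PySem.Dict.getD_eq_get?_getD, hget]; rfl
          refine ⟨d, (if 2 ≤ (t : Int) - d.getD (pairAt cs t) 0 then true else db), ?_, ?_, ?_⟩
          · rw [hcon]; simp
          · intro q
            rcases ihd q with ⟨hn2, ha2⟩ | ⟨j1, hj1t, hj1n, hget1, hpq, hm⟩
            · refine Or.inl ⟨hn2, ?_⟩
              intro j hj hjn
              rcases Nat.lt_succ_iff_lt_or_eq.mp hj with hj' | rfl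
              · exact ha2 j hj' hjn
              · intro hc
                rw [← hc] at hn2
                rw [hn2] at hget
                cases hget
            · exact Or.inr ⟨j1, by omega, hj1n, hget1, hpq, hm⟩
          · rw [hgd, hdb, dblB_succ]
            have hiff : (t + 1 < cs.length ∧ ∃ j < t, j + 2 ≤ t ∧ pairAt cs j = pairAt cs t)
                ↔ j0 + 2 ≤ t := by
              constructor
              · rintro ⟨_, j, hj, hj2, hpj⟩
                by_cases hlt : j < j0
                · exact absurd hpj (hmin j hlt)
                · omega
              · intro hj2
                exact ⟨h1, j0, by omega, hj2, hpairj0⟩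
            by_cases h2 : j0 + 2 ≤ t
            · have hint : (2 : Int) ≤ (t : Int) - ((j0 : Nat) : Int) := by omega
              rw [if_pos hint]
              have : decide (t + 1 < cs.length ∧ ∃ j < t, j + 2 ≤ t ∧ pairAt cs j = pairAt cs t) = true :=
                decide_eq_true (hiff.mpr h2)
              rw [this, Bool.or_true]
            · have hint : ¬((2 : Int) ≤ (t : Int) - ((j0 : Nat) : Int)) := by omega
              rw [if_neg hint]
              have : decide (t + 1 < cs.length ∧ ∃ j < t, j + 2 ≤ t ∧ pairAt cs j = pairAt cs t) = false := by
                apply decide_eq_false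
                intro hc
                exact h2 (hiff.mp hc)
              rw [this, Bool.or_false]
      · rw [if_neg h1]
        refine ⟨d, db, rfl, ?_, ?_⟩
        · intro q
          rcases ihd q with ⟨hn2, ha2⟩ | ⟨j1, hj1t, hj1n, hget1, hpq, hm⟩
          · refine Or.inl ⟨hn2, ?_⟩
            intro j hj hjn
            rcases Nat.lt_succ_iff_lt_or_eq.mp hj with hj' | rfl
            · exact ha2 j hj' hjn
            · omega
          · exact Or.inr ⟨j1, by omega, hj1n, hget1, hpq, hm⟩
        · rw [hdb, dblB_succ]
          have : decide (t + 1 < cs.length ∧ ∃ j < t, j + 2 ≤ t ∧ pairAt cs j = pairAt cs t) = false := by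
            apply decide_eq_false
            rintro ⟨hc, _⟩
            exact h1 hc
          rw [this, Bool.or_false]
    obtain ⟨d', db', hst1, hinv', hdb'⟩ := key
    rw [hst1]
    have hsnd : (if 2 ≤ t ∧ cs.getD t ' ' = cs.getD (t - 2) ' ' then true else sn) = sndB cs (t + 1) := by
      rw [hsn, sndB_succ]
      by_cases hc : 2 ≤ t ∧ cs.getD t ' ' = cs.getD (t - 2) ' '
      · rw [if_pos hc]
        have : decide (2 ≤ t ∧ t < cs.length ∧ cs.getD t ' ' = cs.getD (t - 2) ' ') = true :=
          decide_eq_true ⟨hc.1, htn, hc.2⟩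
        rw [this, Bool.or_true]
      · rw [if_neg hc]
        have : decide (2 ≤ t ∧ t < cs.length ∧ cs.getD t ' ' = cs.getD (t - 2) ' ') = false := by
          apply decide_eq_false
          rintro ⟨ha, _, hb⟩
          exact hc ⟨ha, hb⟩
        rw [this, Bool.or_false]
    by_cases hc : 2 ≤ t ∧ cs.getD t ' ' = cs.getD (t - 2) ' '
    · rw [if_pos hc] at hsnd ⊢
      exact ⟨hinv', by rw [hdb', ← hsnd]⟩
    · rw [if_neg hc] at hsnd ⊢
      exact ⟨hinv', by rw [hdb', ← hsnd]⟩

theorem lineB_eq (cs : List Char) :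
    (solveLineB cs).2 = (dblB cs cs.length, sndB cs cs.length) := by
  rw [solveLineB_eq_bpart]
  exact (B_invariant cs cs.length (le_refl _)).2

-- ===== VERDICT (by name: the statement is the Claim_ definition above) =====
theorem solve_spec : Claim_equal_solve := by
  intro lines _
  unfold Spec_solve solve solve_alt
  have h : (fun (count : Int) (line : String) =>
        let r := solveLineA line.toList
        if r.1 && r.2 then count + 1 else count)
      = (fun (count : Int) (line : String) =>
        let r := solveLineB line.toList
        if r.2.1 && r.2.2 then count + 1 else count) := by
    funext count line
    simp only [lineA_eq, lineB_eq]
  rw [h]
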